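-- pv_equiv track=rewrite | github.com/Amande-bld/pychat-bot-moretti-blanchard-E | function.py | tokenization_question
-- ===== SOURCE A (Python) =====
-- def tokenization_question(question):
--     word_question = []
--     # Application des mêmes modifiaction du texte sur la question
--
--     content_lowercase = question.lower()
--     punctuation_character = ',;:.?!""()[]*/'
--     question_clean = ''
--
--     for car in content_lowercase:
--         if car in punctuation_character:
--             question_clean += ' '
--         elif car == "'" or car == "-":
--             question_clean += ' '
--         else:
--             question_clean += car
--
--     # Divise la question en mot
--     content = question_clean.split()
--     for word in content:
--         word_question.append(word)
--     return word_question
-- ===== SOURCE B (Python) =====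
-- def tokenization_question(question):
--     # single-pass tokenizer: scan once, cutting words at separator characters
--     separators = ",;:.?!\"\"()[]*/'-"
--     word_question = []
--     buf = []
--     for car in question.lower():
--         if car in separators or car.isspace():
--             if buf:
--                 word_question.append(''.join(buf))
--             buf = []
--         else:
--             buf.append(car)
--     if buf:
--         word_question.append(''.join(buf))
--     return word_question
-- ===== Notes on version B (the rewrite author's own statement) =====
-- stated objective: alternative
-- what changed: Replaces A's two-phase pipeline (build a cleaned copy of the string with separators mapped to spaces, then split() it and copy the words) with a single-pass tokenizer that scans the lowered string once, cutting words at punctuation/apostrophe/hyphen/whitespace, with no intermediate cleaned string.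
import Mathlib
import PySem

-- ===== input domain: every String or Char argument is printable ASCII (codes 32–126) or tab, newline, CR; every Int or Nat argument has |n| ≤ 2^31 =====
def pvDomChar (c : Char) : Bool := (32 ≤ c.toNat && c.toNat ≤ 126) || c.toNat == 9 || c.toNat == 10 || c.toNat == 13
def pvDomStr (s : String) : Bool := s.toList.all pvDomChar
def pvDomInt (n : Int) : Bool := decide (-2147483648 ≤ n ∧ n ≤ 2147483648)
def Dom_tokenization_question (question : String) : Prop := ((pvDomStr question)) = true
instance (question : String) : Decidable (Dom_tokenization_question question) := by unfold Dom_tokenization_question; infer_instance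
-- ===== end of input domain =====

-- B replaces A's two-phase "replace separators by spaces, then split()" with a
-- single-pass tokenizer over the lowered string (objective: alternative decomposition).

-- ===== PORT A =====
def tokenization_question (question : String) : List String :=
  let content_lowercase := PySem.Str.lower question
  let punctuation_character : List Char := ",;:.?!\"\"()[]*/".toList
  let question_clean := content_lowercase.toList.foldl (fun qc car =>
    if punctuation_character.contains car then qc ++ " "
    else if car = '\'' ∨ car = '-' then qc ++ " "
    else qc ++ String.ofList [car]) ""
  let content := PySem.Str.split₀ question_clean
  content.foldl (fun ws w => ws ++ [w]) []

-- ===== PORT B =====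
def pvIsSep (car : Char) : Bool :=
  (",;:.?!\"\"()[]*/'-".toList.contains car) || PySem.Chars.isspace car

-- the single for-loop of Source B: words collected so far, current buffer
def pvGoB : List Char → List String → List Char → List String
  | [], word_question, buf =>
      if buf.isEmpty then word_question else word_question ++ [String.ofList buf]
  | car :: rest, word_question, buf =>
      if pvIsSep car then
        pvGoB rest (if buf.isEmpty then word_question else word_question ++ [String.ofList buf]) []
      else
        pvGoB rest word_question (buf ++ [car])

def tokenization_question_alt (question : String) : List String :=
  pvGoB (PySem.Str.lower question).toList [] []

-- ===== PRECONDITION & SPEC =====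
def Spec_tokenization_question (question : String) (out : List String) : Prop := out = tokenization_question_alt question
instance (question : String) (out : List String) : Decidable (Spec_tokenization_question question out) := by unfold Spec_tokenization_question; infer_instance

-- ===== CLAIM (what is proved, stated in full; the proofs are below) =====
def Claim_equal_tokenization_question : Prop := ∀ (question : String), Dom_tokenization_question question → Spec_tokenization_question question (tokenization_question question)

-- ===== LEMMAS AND PROOFS =====

-- A's per-character cleaning map
def pvClean (c : Char) : Char :=
  if (",;:.?!\"\"()[]*/".toList.contains c) then ' '
  else if c = '\'' ∨ c = '-' then ' '
  else c

lemma pvPunct_toList : ",;:.?!\"\"()[]*/".toList = [',',';',':','.','?','!','"','"','(',')','[',']','*','/'] := by decide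

lemma pvSeps_toList : ",;:.?!\"\"()[]*/'-".toList = [',',';',':','.','?','!','"','"','(',')','[',']','*','/','\'','-'] := by decide

lemma pvIsspace_clean (c : Char) : PySem.Chars.isspace (pvClean c) = pvIsSep c := by
  unfold pvClean pvIsSep
  rw [pvPunct_toList, pvSeps_toList]
  split_ifs with h1 h2
  · have h1' : c ∈ [',',';',':','.','?','!','"','"','(',')','[',']','*','/'] := by
      simpa using h1
    fin_cases h1' <;> decide
  · rcases h2 with rfl | rfl <;> decide
  · have hl : ([',',';',':','.','?','!','"','"','(',')','[',']','*','/','\'','-'].contains c) = false := by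
      simp only [List.contains_eq_mem, List.mem_cons, List.not_mem_nil, or_false,
        decide_eq_false_iff_not] at h1 ⊢
      simp only [decide_eq_true_eq] at h1
      push Not at h2
      tauto
    rw [hl]
    simp

lemma pvClean_of_not_sep (c : Char) (h : pvIsSep c = false) : pvClean c = c := by
  unfold pvIsSep at h
  rw [pvSeps_toList] at h
  simp only [Bool.or_eq_false_iff, List.contains_eq_mem, List.mem_cons, List.not_mem_nil, or_false,
    decide_eq_false_iff_not] at h
  unfold pvClean
  rw [pvPunct_toList]
  split_ifs with h1 h2
  · exfalso
    simp only [List.contains_eq_mem, List.mem_cons, List.not_mem_nil, or_false,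
      decide_eq_true_eq] at h1
    tauto
  · exfalso; tauto
  · rfl

lemma pvClean_fold (cs : List Char) (s : String) :
    (cs.foldl (fun qc car =>
      if (",;:.?!\"\"()[]*/".toList.contains car) then qc ++ " "
      else if car = '\'' ∨ car = '-' then qc ++ " "
      else qc ++ String.ofList [car]) s).toList = s.toList ++ cs.map pvClean := by
  induction cs generalizing s with
  | nil => simp
  | cons c rest ih =>
      simp only [List.foldl_cons, List.map_cons]
      rw [ih]
      unfold pvClean
      split_ifs <;> simp

lemma pvGo_eq (cs : List Char) : ∀ (cur : List Char) (acc : List (List Char)),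
    List.map String.ofList (PySem.Chars.split₀.go (cs.map pvClean) cur acc)
      = pvGoB cs (List.map String.ofList acc.reverse) cur.reverse := by
  induction cs with
  | nil =>
      intro cur acc
      simp only [List.map_nil, PySem.Chars.split₀.go, pvGoB]
      by_cases h : cur.isEmpty <;> simp [h]
  | cons c rest ih =>
      intro cur acc
      simp only [List.map_cons, PySem.Chars.split₀.go, pvGoB, pvIsspace_clean]
      by_cases hs : pvIsSep c
      · simp only [hs, if_pos]
        by_cases hc : cur.isEmpty
        · have : cur.reverse.isEmpty = true := by simp_all
          simp [hc, this, ih]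
        · have : cur.reverse.isEmpty = false := by simp_all
          simp [hc, this, ih]
      · have hcl : pvClean c = c := pvClean_of_not_sep c (by simp_all)
        simp [hs, hcl, ih, List.reverse_cons]

lemma pvFold_append (l : List String) (acc : List String) :
    l.foldl (fun ws w => ws ++ [w]) acc = acc ++ l := by
  induction l generalizing acc with
  | nil => simp
  | cons w rest ih => simp [ih]

-- ===== VERDICT (by name: the statement is the Claim_ definition above) =====
theorem tokenization_question_spec : Claim_equal_tokenization_question := by
  intro question _
  unfold Spec_tokenization_question tokenization_question tokenization_question_alt
  simp only []
  rw [pvFold_append, List.nil_append]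
  unfold PySem.Str.split₀ PySem.Chars.split₀
  rw [pvClean_fold]
  simpa using pvGo_eq (PySem.Str.lower question).toList [] []
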